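-- pv_equiv track=rewrite | github.com/salauddinaliahmed/DS | Chapter12/chap12_exercise.py | q1_unwanted_calls
-- ===== SOURCE A (Python) =====
-- def q1_unwanted_calls(a):
--     if len(a) == 0:
--         return 0
--
--     accumulated_sum = q1_unwanted_calls(a[1:])
--
--     if a[0] + accumulated_sum > 100:
--         return accumulated_sum
--
--     else:
--         return a[0] + accumulated_sum
-- ===== SOURCE B (Python) =====
-- def q1_unwanted_calls(a):
--     acc = 0
--     for x in reversed(a):
--         if x + acc <= 100:
--             acc += x
--     return acc
-- ===== Notes on version B (the rewrite author's own statement) =====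
-- stated objective: faster
-- what changed: Replaced the O(n^2) recursion with list slicing by a single reverse iteration with a running accumulator.
import Mathlib
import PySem

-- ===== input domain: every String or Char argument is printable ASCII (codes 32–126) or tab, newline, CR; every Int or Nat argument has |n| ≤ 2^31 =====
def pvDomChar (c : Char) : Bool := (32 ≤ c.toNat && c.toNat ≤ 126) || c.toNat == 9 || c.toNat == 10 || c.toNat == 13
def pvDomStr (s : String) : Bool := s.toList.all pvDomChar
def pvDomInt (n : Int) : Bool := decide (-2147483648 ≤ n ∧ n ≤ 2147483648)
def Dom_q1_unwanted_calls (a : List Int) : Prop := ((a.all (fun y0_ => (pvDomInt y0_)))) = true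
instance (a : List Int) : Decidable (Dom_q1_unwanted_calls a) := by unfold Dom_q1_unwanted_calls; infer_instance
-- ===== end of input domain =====

-- ===== PORT A =====
-- literal port of A: structural recursion, a[1:] is the tail
def q1_unwanted_calls (a : List Int) : Int :=
  match a with
  | [] => 0
  | x :: xs =>
    let accumulated_sum := q1_unwanted_calls xs
    if x + accumulated_sum > 100 then accumulated_sum
    else x + accumulated_sum

-- ===== PORT B =====
-- B: single pass over the reversed list with a running accumulator
def q1_unwanted_calls_alt (a : List Int) : Int :=
  a.reverse.foldl (fun acc x => if x + acc ≤ 100 then acc + x else acc) 0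

-- ===== PRECONDITION & SPEC =====
def Spec_q1_unwanted_calls (a : List Int) (out : Int) : Prop := out = q1_unwanted_calls_alt a
instance (a : List Int) (out : Int) : Decidable (Spec_q1_unwanted_calls a out) := by unfold Spec_q1_unwanted_calls; infer_instance

-- ===== CLAIM (what is proved, stated in full; the proofs are below) =====
def Claim_equal_q1_unwanted_calls : Prop := ∀ (a : List Int), Dom_q1_unwanted_calls a → Spec_q1_unwanted_calls a (q1_unwanted_calls a)

-- ===== LEMMAS AND PROOFS =====

-- ===== VERDICT (by name: the statement is the Claim_ definition above) =====
theorem alt_cons (x : Int) (xs : List Int) :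
    q1_unwanted_calls_alt (x :: xs) =
      (if x + q1_unwanted_calls_alt xs ≤ 100 then q1_unwanted_calls_alt xs + x
       else q1_unwanted_calls_alt xs) := by
  simp [q1_unwanted_calls_alt, List.reverse_cons, List.foldl_append]

theorem eq_all (a : List Int) : q1_unwanted_calls a = q1_unwanted_calls_alt a := by
  induction a with
  | nil => simp [q1_unwanted_calls, q1_unwanted_calls_alt]
  | cons x xs ih =>
    rw [alt_cons, ← ih]
    simp only [q1_unwanted_calls]
    split_ifs <;> omega

theorem q1_unwanted_calls_spec : Claim_equal_q1_unwanted_calls := by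
  intro a _
  exact eq_all a
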